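-- pv_equiv track=rewrite | github.com/estherwanjiku007/python-challenge | challenge1.py | sum_max
-- ===== SOURCE A (Python) =====
-- def sum_max(an_array):
--     # checking if possible to have 10 bricks in each box
--     total_bricks2 = sum(an_array)
--     no_of_boxes2 = len(an_array)
--     if total_bricks2 != 10 * no_of_boxes2:
--         return -1
--     # keep track of the moves
--     moves = 0
--     # iterate over the boxes
--     for i in range(no_of_boxes2):
--         # check each brick for any deficit or excess
--         if an_array[i] > 10:
--             diff = an_array[i] - 10
--             # if any excess i move the excess to the brick
--             an_array[i] -= diff
--             an_array[i + 1] += diff            # update my moves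
--             moves += diff
--             #  deficit
--         elif an_array[i] < 10:
--             diff = 10 - an_array[i]
--             # if any deficit , bring in the diff. from the next box
--             an_array[i] += diff
--             an_array[i + 1] -=diff
--             moves += diff
--     return moves
-- ===== SOURCE B (Python) =====
-- def sum_max(an_array):
--     # Impossible unless the total is exactly 10 per box.
--     if sum(an_array) != 10 * len(an_array):
--         return -1
--     # One pass over the values: the bricks moved across each boundary equal
--     # the absolute running imbalance of the prefix.
--     moves = 0
--     running = 0
--     for x in an_array:
--         running += x - 10
--         moves += abs(running)
--     return moves
-- ===== Notes on version B (the rewrite author's own statement) =====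
-- stated objective: simpler
-- what changed: Replaces the if/elif simulation of neighbour brick transfers (which rewrites an_array in place) by a single pass summing the absolute running prefix imbalance; B does not mutate the list, so the equivalence is about the return value only.
import Mathlib
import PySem

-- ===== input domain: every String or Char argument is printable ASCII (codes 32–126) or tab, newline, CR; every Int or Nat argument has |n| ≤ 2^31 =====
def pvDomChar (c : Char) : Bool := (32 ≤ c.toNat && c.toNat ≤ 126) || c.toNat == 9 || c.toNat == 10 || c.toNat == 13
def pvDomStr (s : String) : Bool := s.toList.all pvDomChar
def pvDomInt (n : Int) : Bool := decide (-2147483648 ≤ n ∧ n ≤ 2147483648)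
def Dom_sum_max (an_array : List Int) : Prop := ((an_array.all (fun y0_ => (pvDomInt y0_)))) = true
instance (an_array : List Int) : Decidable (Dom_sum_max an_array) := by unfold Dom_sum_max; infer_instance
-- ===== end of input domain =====

-- B replaces A's neighbour-transfer simulation by one pass over the running prefix
-- imbalance (objective: simpler). A mutates an_array in place, B does not: the
-- equivalence proved here is about the RETURN value only.

-- ===== PORT A =====
-- the for-loop of A: state is the (mutated) list and the move counter; fuel = number of
-- remaining iterations of 'for i in range(no_of_boxes2)'.
-- 'an_array[i + 1] += diff' is ported as List.modify (i+1); for Int inputs whose total is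
-- 10*len the index i+1 is in range whenever that line runs (a[i] = 10 at the last i),
-- so Python never raises there and the out-of-range no-op of modify is unreachable.
def sum_max_loop : List Int → Nat → Nat → Int → Int
  | _, _, 0, moves => moves
  | arr, i, fuel+1, moves =>
    let x := (PySem.List.pyGet? arr (Int.ofNat i)).getD 0
    if x > 10 then
      let diff := x - 10
      sum_max_loop ((arr.set i (x - diff)).modify (i+1) (· + diff)) (i+1) fuel (moves + diff)
    else if x < 10 then
      let diff := 10 - x
      sum_max_loop ((arr.set i (x + diff)).modify (i+1) (· - diff)) (i+1) fuel (moves + diff)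
    else
      sum_max_loop arr (i+1) fuel moves

def sum_max (an_array : List Int) : Int :=
  let total_bricks2 := an_array.foldl (· + ·) 0
  let no_of_boxes2 := an_array.length
  if total_bricks2 ≠ 10 * (no_of_boxes2 : Int) then -1
  else sum_max_loop an_array 0 no_of_boxes2 0

-- ===== PORT B =====
-- Source B's loop: state (running, moves); per element running += x - 10; moves += |running|.
def sum_max_alt (an_array : List Int) : Int :=
  if an_array.foldl (· + ·) 0 ≠ 10 * (an_array.length : Int) then -1
  else (an_array.foldl (fun (rm : Int × Int) x => (rm.1 + x - 10, rm.2 + |rm.1 + x - 10|)) (0, 0)).2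

-- ===== PRECONDITION & SPEC =====
def Spec_sum_max (an_array : List Int) (out : Int) : Prop := out = sum_max_alt an_array
instance (an_array : List Int) (out : Int) : Decidable (Spec_sum_max an_array out) := by unfold Spec_sum_max; infer_instance

-- ===== CLAIM (what is proved, stated in full; the proofs are below) =====
def Claim_equal_sum_max : Prop := ∀ (an_array : List Int), Dom_sum_max an_array → Spec_sum_max an_array (sum_max an_array)

-- ===== LEMMAS AND PROOFS =====

-- sum of |running prefix imbalance| starting from imbalance c, counting c itself
def pvS : Int → List Int → Int
  | c, [] => |c|
  | c, y :: ys => |c| + pvS (c + y - 10) ys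

lemma modify_append_cons (D ys : List Int) (f : Int → Int) (y : Int) :
    (D ++ (10 : Int) :: y :: ys).modify (D.length + 1) f = (D ++ [(10 : Int)]) ++ f y :: ys := by
  induction D with
  | nil => simp [List.modify]
  | cons d D ih => simpa [List.modify] using ih

lemma set_append_cons (D ys : List Int) (v c : Int) :
    (D ++ c :: ys).set D.length v = D ++ v :: ys := by
  rw [List.set_append_right _ _ (le_refl _)]
  simp

lemma pyGet_append (D ys : List Int) (c : Int) :
    (PySem.List.pyGet? (D ++ c :: ys) (Int.ofNat D.length)).getD 0 = c := by
  rw [Int.ofNat_eq_natCast, PySem.List.pyGet?_append_length]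
  rfl

lemma sum_max_loop_eq (ys : List Int) : ∀ (D : List Int) (c m : Int),
    sum_max_loop (D ++ (10 + c) :: ys) D.length (ys.length + 1) m = m + pvS c ys := by
  induction ys with
  | nil =>
    intro D c m
    rw [show ([] : List Int).length + 1 = 0 + 1 from rfl, sum_max_loop]
    simp only [pyGet_append, pvS]
    by_cases h : c > 0
    · rw [if_pos (by omega)]
      have := abs_of_pos h
      simp only [sum_max_loop]; omega
    · by_cases h2 : c < 0
      · rw [if_neg (by omega), if_pos (by omega)]
        have := abs_of_neg h2
        simp only [sum_max_loop]; omega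
      · rw [if_neg (by omega), if_neg (by omega)]
        have : |c| = 0 := by simp [show c = 0 by omega]
        simp only [sum_max_loop]; omega
  | cons y ys ih =>
    intro D c m
    rw [show (y :: ys).length + 1 = (ys.length + 1) + 1 from rfl, sum_max_loop]
    simp only [pyGet_append, pvS]
    have hlen : D.length + 1 = (D ++ [(10 : Int)]).length := by simp
    by_cases h : c > 0
    · rw [if_pos (by omega)]
      have e1 : 10 + c - (10 + c - 10) = (10 : Int) := by ring
      rw [e1, set_append_cons, modify_append_cons]
      have e2 : (y + (10 + c - 10)) = (10 + (c + y - 10) : Int) := by ring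
      rw [e2, hlen, ih]
      have := abs_of_pos h
      omega
    · by_cases h2 : c < 0
      · rw [if_neg (by omega), if_pos (by omega)]
        have e1 : 10 + c + (10 - (10 + c)) = (10 : Int) := by ring
        rw [e1, set_append_cons, modify_append_cons]
        have e2 : (y - (10 - (10 + c))) = (10 + (c + y - 10) : Int) := by ring
        rw [e2, hlen, ih]
        have := abs_of_neg h2
        omega
      · rw [if_neg (by omega), if_neg (by omega)]
        have hc : c = 0 := by omega
        subst hc
        have e : D ++ (10 + (0:Int)) :: y :: ys = (D ++ [(10 : Int)]) ++ (10 + (y - 10)) :: ys := by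
          simp
        rw [e, hlen, ih]
        simp

lemma alt_foldl_eq (xs : List Int) : ∀ (r m : Int),
    (xs.foldl (fun (rm : Int × Int) x => (rm.1 + x - 10, rm.2 + |rm.1 + x - 10|)) (r, m)).2
      = m + (pvS r xs - |r|) := by
  induction xs with
  | nil => intro r m; simp [pvS]
  | cons y ys ih =>
    intro r m
    simp only [List.foldl_cons, ih, pvS]
    ring

-- ===== VERDICT (by name: the statement is the Claim_ definition above) =====
theorem sum_max_spec : Claim_equal_sum_max := by
  intro an_array _
  unfold Spec_sum_max sum_max sum_max_alt
  by_cases hg : an_array.foldl (· + ·) 0 ≠ 10 * (an_array.length : Int)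
  · simp [hg]
  · rw [if_neg hg, if_neg hg]
    cases an_array with
    | nil => simp [sum_max_loop]
    | cons x rest =>
      have := sum_max_loop_eq rest [] (x - 10) 0
      simp only [List.nil_append, List.length_nil] at this
      rw [show (10 : Int) + (x - 10) = x by ring] at this
      simp only [List.length_cons] at *
      rw [this, alt_foldl_eq]
      simp [pvS]
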